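-- pv_equiv track=rewrite | github.com/benluwang/MedThinkVQA | data_processing/leakage.py | _normalize_option_ids
-- ===== SOURCE A (Python) =====
-- from typing import List, Tuple, Optional, Dict, Any, Iterable, Union
--
-- def _normalize_option_ids(raw_ids: List[Any], valid_ids: List[str]) -> List[str]:
--     """
--     Normalize leaked_options:
--       - Uppercase
--       - Strip common trailing punctuation, such as ')' or '.'
--       - Keep only letters present in valid_ids (the real option set)
--       - Deduplicate and keep order consistent with valid_ids
--     """
--     seen = set()
--     ordered = []
--     valid_set = set(valid_ids)
--
--     def canon_one(x: Any) -> Optional[str]: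
--         s = str(x).strip().upper()
--         if s.endswith(")") or s.endswith("."):
--             s = s[:-1]
--         if len(s) == 1 and s in valid_set:
--             return s
--         return None
--
--     for x in (raw_ids or []):
--         c = canon_one(x)
--         if c and c not in seen:
--             seen.add(c)
--             ordered.append(c)
--
--     # Sort by the order in valid_ids
--     order_map = {k: i for i, k in enumerate(valid_ids)}
--     ordered.sort(key=lambda k: order_map.get(k, 1_000_000))
--     return ordered
-- ===== SOURCE B (Python) =====
-- from typing import List, Any, Optional
--
-- def _normalize_option_ids(raw_ids: List[Any], valid_ids: List[str]) -> List[str]: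
--     valid_set = set(valid_ids)
--
--     def canon_one(x: Any) -> Optional[str]:
--         s = str(x).strip().upper()
--         if s.endswith(")") or s.endswith("."):
--             s = s[:-1]
--         if len(s) == 1 and s in valid_set:
--             return s
--         return None
--
--     present = set()
--     for x in (raw_ids or []):
--         c = canon_one(x)
--         if c:
--             present.add(c)
--
--     result = []
--     seen = set()
--     for v in valid_ids:
--         if v in present and v not in seen:
--             seen.add(v)
--             result.append(v)
--     return result
-- ===== Notes on version B (the rewrite author's own statement) =====
-- stated objective: simpler
-- what changed: B drops A's order_map dict and explicit sort: it collects the set of canonical IDs in one pass and then emits valid_ids filtered by that set (with a seen-set dedupe), so the reference order is obtained by a single ordered filtering pass instead of collect-then-sort.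
-- outside the precondition, e.g. on _normalize_option_ids(['A', 'B'], ['A', 'B', 'A']): A returns ['B', 'A'], B returns ['A', 'B']
import Mathlib
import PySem

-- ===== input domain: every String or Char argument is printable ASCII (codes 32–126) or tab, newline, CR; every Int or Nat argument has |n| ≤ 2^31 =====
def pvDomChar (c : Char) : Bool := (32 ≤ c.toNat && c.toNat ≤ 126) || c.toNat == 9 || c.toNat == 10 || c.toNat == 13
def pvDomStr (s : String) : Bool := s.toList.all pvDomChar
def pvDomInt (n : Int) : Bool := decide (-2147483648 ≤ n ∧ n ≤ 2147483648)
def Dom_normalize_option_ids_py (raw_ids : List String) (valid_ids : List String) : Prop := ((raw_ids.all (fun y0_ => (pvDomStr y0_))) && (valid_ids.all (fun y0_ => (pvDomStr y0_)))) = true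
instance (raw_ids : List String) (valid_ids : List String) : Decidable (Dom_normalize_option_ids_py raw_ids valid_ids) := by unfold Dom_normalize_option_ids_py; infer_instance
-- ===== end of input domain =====

-- B replaces A's order_map dict + explicit sort by one ordered filtering pass over valid_ids (simpler; same values on the stated Pre_).

-- ===== PORT A =====
-- canon_one, shared helper: s = str(x).strip().upper(), drop one trailing ')' or '.'
def pvDropPunct (s : String) : String :=
  if PySem.Str.endswith s ")" || PySem.Str.endswith s "." then PySem.Str.slice s none (some (-1)) else s
def pvCanon (valid_set : PySem.Set String) (x : String) : Option String :=
  if PySem.Str.len (pvDropPunct (PySem.Str.upper (PySem.Str.strip x))) == 1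
      && PySem.Set.contains valid_set (pvDropPunct (PySem.Str.upper (PySem.Str.strip x)))
  then some (pvDropPunct (PySem.Str.upper (PySem.Str.strip x))) else none

def pvStepA (valid_set : PySem.Set String) (st : PySem.Set String × List String) (x : String) : PySem.Set String × List String :=
  match pvCanon valid_set x with
  | none => st
  | some c => if !(c == "") && !(PySem.Set.contains st.1 c) then (PySem.Set.add st.1 c, st.2 ++ [c]) else st

def pvStepD (d : PySem.Dict String Int) (p : Int × String) : PySem.Dict String Int := d.insert p.2 p.1


def normalize_option_ids_py (raw_ids : List String) (valid_ids : List String) : List String :=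
  let valid_set : PySem.Set String := PySem.Set.ofList valid_ids
  let st := raw_ids.foldl (pvStepA valid_set) (PySem.Set.empty, [])
  let order_map := (PySem.List.enumerate valid_ids).foldl pvStepD PySem.Dict.empty
  PySem.List.sorted st.2 (fun k => order_map.getD k 1000000) false

-- ===== PORT B =====
def pvStepP (valid_set : PySem.Set String) (pr : PySem.Set String) (x : String) : PySem.Set String :=
  match pvCanon valid_set x with
  | none => pr
  | some c => if !(c == "") then PySem.Set.add pr c else pr

def pvStepB (present : PySem.Set String) (st : PySem.Set String × List String) (v : String) : PySem.Set String × List String :=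
  if PySem.Set.contains present v && !(PySem.Set.contains st.1 v) then (PySem.Set.add st.1 v, st.2 ++ [v]) else st


def normalize_option_ids_py_alt (raw_ids : List String) (valid_ids : List String) : List String :=
  let valid_set : PySem.Set String := PySem.Set.ofList valid_ids
  let present := raw_ids.foldl (pvStepP valid_set) PySem.Set.empty
  (valid_ids.foldl (pvStepB present) (PySem.Set.empty, [])).2

-- ===== PRECONDITION & SPEC =====
-- Pre_ excludes valid_ids with duplicate entries, on which A's sort key comes from a dict comprehension
-- whose duplicate keys overwrite (last occurrence wins) — an accidental ordering; B uses first occurrences.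
def Pre_normalize_option_ids_py (raw_ids : List String) (valid_ids : List String) : Prop := valid_ids.Nodup
instance (raw_ids : List String) (valid_ids : List String) : Decidable (Pre_normalize_option_ids_py raw_ids valid_ids) := by unfold Pre_normalize_option_ids_py; infer_instance
def pvWitness_normalize_option_ids_py : List String × List String := (["b)", " a ", "A"], ["A", "B", "C"])

def Spec_normalize_option_ids_py (raw_ids : List String) (valid_ids : List String) (out : List String) : Prop := out = normalize_option_ids_py_alt raw_ids valid_ids
instance (raw_ids : List String) (valid_ids : List String) (out : List String) : Decidable (Spec_normalize_option_ids_py raw_ids valid_ids out) := by unfold Spec_normalize_option_ids_py; infer_instance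

-- ===== CLAIM (what is proved, stated in full; the proofs are below) =====
def Claim_equal_normalize_option_ids_py : Prop := ∀ (raw_ids : List String) (valid_ids : List String), Dom_normalize_option_ids_py raw_ids valid_ids → Pre_normalize_option_ids_py raw_ids valid_ids → Spec_normalize_option_ids_py raw_ids valid_ids (normalize_option_ids_py raw_ids valid_ids)

-- ===== LEMMAS AND PROOFS =====
theorem pvCanon_ne_empty {vs : PySem.Set String} {x c : String} (h : pvCanon vs x = some c) : c ≠ "" := by
  unfold pvCanon at h
  generalize pvDropPunct (PySem.Str.upper (PySem.Str.strip x)) = s at h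
  split_ifs at h with hc
  simp only [Option.some.injEq] at h
  subst h
  intro he
  rw [he] at hc
  simp [PySem.Str.len] at hc

theorem pvCanon_mem {valid_ids : List String} {x c : String}
    (h : pvCanon (PySem.Set.ofList valid_ids) x = some c) : c ∈ valid_ids := by
  unfold pvCanon at h
  generalize pvDropPunct (PySem.Str.upper (PySem.Str.strip x)) = s at h
  split_ifs at h with hc
  simp only [Option.some.injEq] at h
  subst h
  rw [Bool.and_eq_true] at hc
  have := (PySem.Set.contains_iff _ _).mp hc.2
  rwa [PySem.Set.mem_ofList] at this
theorem pvStepA_none {vs : PySem.Set String} {x : String} (st : PySem.Set String × List String)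
    (h : pvCanon vs x = none) : pvStepA vs st x = st := by
  unfold pvStepA; rw [h]

theorem pvStepA_some {vs : PySem.Set String} {x c : String} (st : PySem.Set String × List String)
    (h : pvCanon vs x = some c) :
    pvStepA vs st x = if !(c == "") && !(PySem.Set.contains st.1 c) then (PySem.Set.add st.1 c, st.2 ++ [c]) else st := by
  unfold pvStepA; rw [h]

theorem pvLoopA_spec (vs : PySem.Set String) (raw : List String) (seen : PySem.Set String) (acc : List String)
    (hseen : ∀ y, y ∈ seen ↔ y ∈ acc) (hnd : acc.Nodup) :
    (∀ y, y ∈ (raw.foldl (pvStepA vs) (seen, acc)).1 ↔ y ∈ (raw.foldl (pvStepA vs) (seen, acc)).2) ∧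
    (raw.foldl (pvStepA vs) (seen, acc)).2.Nodup ∧
    (∀ y, y ∈ (raw.foldl (pvStepA vs) (seen, acc)).2 ↔ y ∈ acc ∨ ∃ x ∈ raw, pvCanon vs x = some y) := by
  induction raw generalizing seen acc with
  | nil => simp [hseen, hnd]
  | cons x raw ih =>
    simp only [List.foldl_cons]
    rcases hc : pvCanon vs x with _ | c
    · rw [pvStepA_none _ hc]
      obtain ⟨h1, h2, h3⟩ := ih seen acc hseen hnd
      refine ⟨h1, h2, ?_⟩
      intro y
      rw [h3 y]
      constructor
      · rintro (h | ⟨z, hz, hcz⟩)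
        · exact Or.inl h
        · exact Or.inr ⟨z, List.mem_cons_of_mem _ hz, hcz⟩
      · rintro (h | ⟨z, hz, hcz⟩)
        · exact Or.inl h
        · rcases List.mem_cons.mp hz with rfl | hz
          · rw [hc] at hcz; exact absurd hcz (by simp)
          · exact Or.inr ⟨z, hz, hcz⟩
    · rw [pvStepA_some _ hc]
      by_cases hmem : c ∈ seen
      · rw [if_neg (by simp; exact fun _ => hmem)]
        obtain ⟨h1, h2, h3⟩ := ih seen acc hseen hnd
        refine ⟨h1, h2, ?_⟩
        intro y
        rw [h3 y]
        constructor
        · rintro (h | ⟨z, hz, hcz⟩)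
          · exact Or.inl h
          · exact Or.inr ⟨z, List.mem_cons_of_mem _ hz, hcz⟩
        · rintro (h | ⟨z, hz, hcz⟩)
          · exact Or.inl h
          · rcases List.mem_cons.mp hz with rfl | hz
            · rw [hc] at hcz
              obtain rfl : c = y := by injection hcz
              exact Or.inl ((hseen c).mp hmem)
            · exact Or.inr ⟨z, hz, hcz⟩
      · have hne : c ≠ "" := pvCanon_ne_empty hc
        have hcon : PySem.Set.contains seen c = false := by
          rw [Bool.eq_false_iff]; intro hcontra; exact hmem ((PySem.Set.contains_iff seen c).mp hcontra)
        rw [if_pos (by simp [hne, hmem])]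
        have hseen' : ∀ y, y ∈ PySem.Set.add seen c ↔ y ∈ acc ++ [c] := by
          intro y
          rw [PySem.Set.mem_add, List.mem_append, hseen, List.mem_singleton]
        have hnd' : (acc ++ [c]).Nodup := by
          refine List.Nodup.append hnd (List.nodup_singleton c) ?_
          intro a ha hb
          rw [List.mem_singleton] at hb; subst hb
          exact hmem ((hseen a).mpr ha)
        obtain ⟨h1, h2, h3⟩ := ih _ _ hseen' hnd'
        refine ⟨h1, h2, ?_⟩
        intro y
        rw [h3 y]
        constructor
        · rintro (h | ⟨z, hz, hcz⟩)
          · rcases List.mem_append.mp h with h | h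
            · exact Or.inl h
            · rw [List.mem_singleton] at h; subst h
              exact Or.inr ⟨x, List.mem_cons_self, hc⟩
          · exact Or.inr ⟨z, List.mem_cons_of_mem _ hz, hcz⟩
        · rintro (h | ⟨z, hz, hcz⟩)
          · exact Or.inl (List.mem_append.mpr (Or.inl h))
          · rcases List.mem_cons.mp hz with rfl | hz
            · rw [hc] at hcz
              obtain rfl : c = y := by injection hcz
              exact Or.inl (by simp)
            · exact Or.inr ⟨z, hz, hcz⟩
theorem pvStepP_none {vs : PySem.Set String} {x : String} (pr : PySem.Set String)
    (h : pvCanon vs x = none) : pvStepP vs pr x = pr := by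
  unfold pvStepP; rw [h]

theorem pvStepP_some {vs : PySem.Set String} {x c : String} (pr : PySem.Set String)
    (h : pvCanon vs x = some c) : pvStepP vs pr x = if !(c == "") then PySem.Set.add pr c else pr := by
  unfold pvStepP; rw [h]

theorem pvLoopP_spec (vs : PySem.Set String) (raw : List String) (pr : PySem.Set String) (y : String) :
    y ∈ raw.foldl (pvStepP vs) pr ↔ y ∈ pr ∨ ∃ x ∈ raw, pvCanon vs x = some y := by
  induction raw generalizing pr with
  | nil => simp
  | cons x raw ih =>
    simp only [List.foldl_cons]
    rcases hc : pvCanon vs x with _ | c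
    · rw [pvStepP_none _ hc, ih]
      constructor
      · rintro (h | ⟨z, hz, hcz⟩)
        · exact Or.inl h
        · exact Or.inr ⟨z, List.mem_cons_of_mem _ hz, hcz⟩
      · rintro (h | ⟨z, hz, hcz⟩)
        · exact Or.inl h
        · rcases List.mem_cons.mp hz with rfl | hz
          · rw [hc] at hcz; exact absurd hcz (by simp)
          · exact Or.inr ⟨z, hz, hcz⟩
    · rw [pvStepP_some _ hc, if_pos (by simp [pvCanon_ne_empty hc]), ih]
      rw [PySem.Set.mem_add]
      constructor
      · rintro ((h | rfl) | ⟨z, hz, hcz⟩)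
        · exact Or.inl h
        · exact Or.inr ⟨x, List.mem_cons_self, hc⟩
        · exact Or.inr ⟨z, List.mem_cons_of_mem _ hz, hcz⟩
      · rintro (h | ⟨z, hz, hcz⟩)
        · exact Or.inl (Or.inl h)
        · rcases List.mem_cons.mp hz with rfl | hz
          · rw [hc] at hcz
            obtain rfl : c = y := by injection hcz
            exact Or.inl (Or.inr rfl)
          · exact Or.inr ⟨z, hz, hcz⟩

theorem pvLoopB_spec (present : PySem.Set String) (vs : List String) (seen : PySem.Set String) (acc : List String)
    (hdisj : ∀ v ∈ vs, v ∉ seen) (hnd : vs.Nodup) :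
    (vs.foldl (pvStepB present) (seen, acc)).2 = acc ++ vs.filter (fun v => PySem.Set.contains present v) := by
  induction vs generalizing seen acc with
  | nil => simp
  | cons v vs ih =>
    have hvseen : PySem.Set.contains seen v = false := by
      rw [Bool.eq_false_iff]
      intro h
      exact hdisj v List.mem_cons_self ((PySem.Set.contains_iff seen v).mp h)
    simp only [List.foldl_cons]
    rcases List.nodup_cons.mp hnd with ⟨hvv, hnd'⟩
    by_cases hp : PySem.Set.contains present v = true
    · have hstep : pvStepB present (seen, acc) v = (PySem.Set.add seen v, acc ++ [v]) := by
        unfold pvStepB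
        rw [if_pos]
        simp only [Bool.and_eq_true, Bool.not_eq_eq_eq_not, Bool.not_true]
        exact ⟨hp, by simpa using hdisj v List.mem_cons_self⟩
      have hdisj2 : ∀ w ∈ vs, w ∉ PySem.Set.add seen v := by
        intro w hw hmem
        rw [PySem.Set.mem_add] at hmem
        rcases hmem with hmem | rfl
        · exact hdisj w (List.mem_cons_of_mem _ hw) hmem
        · exact hvv hw
      rw [hstep, ih _ _ hdisj2 hnd']
      simp only [List.filter_cons, hp, if_pos]
      simp
    · have hpm : v ∉ present := fun h => hp ((PySem.Set.contains_iff _ _).mpr h)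
      have hstep : pvStepB present (seen, acc) v = (seen, acc) := by
        unfold pvStepB; rw [if_neg (by simp; exact fun h => absurd h hpm)]
      rw [hstep, ih _ _ (fun w hw => hdisj w (List.mem_cons_of_mem _ hw)) hnd']
      have hfil : (List.filter (fun v => PySem.Set.contains present v) (v :: vs)) = List.filter (fun v => PySem.Set.contains present v) vs := by
        rw [List.filter_cons, if_neg (by simp; exact hpm)]
      rw [hfil]
theorem pvDict_getD_of_not_mem (vs : List String) (s : Int) (d : PySem.Dict String Int) (k : String)
    (hk : k ∉ vs) : ((PySem.List.enumerate vs s).foldl pvStepD d).getD k 1000000 = d.getD k 1000000 := by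
  induction vs generalizing s d with
  | nil => simp [PySem.List.enumerate_nil]
  | cons v vs ih =>
    rw [PySem.List.enumerate_cons, List.foldl_cons]
    rw [ih _ _ (fun h => hk (List.mem_cons_of_mem _ h))]
    unfold pvStepD
    rw [PySem.Dict.getD_insert, if_neg (fun h : k = v => hk (h ▸ List.mem_cons_self))]

theorem pvDict_getD_getElem (vs : List String) (s : Int) (d : PySem.Dict String Int) (hnd : vs.Nodup) :
    ∀ i (h : i < vs.length), ((PySem.List.enumerate vs s).foldl pvStepD d).getD vs[i] 1000000 = s + i := by
  induction vs generalizing s d with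
  | nil => intro i h; simp at h
  | cons v vs ih =>
    rcases List.nodup_cons.mp hnd with ⟨hvv, hnd'⟩
    intro i h
    rw [PySem.List.enumerate_cons, List.foldl_cons]
    match i with
    | 0 =>
      simp only [List.getElem_cons_zero]
      rw [pvDict_getD_of_not_mem _ _ _ _ hvv]
      unfold pvStepD
      rw [PySem.Dict.getD_insert, if_pos rfl]
      simp
    | (j+1) =>
      simp only [List.getElem_cons_succ]
      rw [ih (s+1) _ hnd' j (by simpa using h)]
      push_cast
      ring
theorem pvMain (raw valid : List String) (hnd : valid.Nodup) :
    normalize_option_ids_py raw valid = normalize_option_ids_py_alt raw valid := by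
  unfold normalize_option_ids_py normalize_option_ids_py_alt
  show PySem.List.sorted (List.foldl (pvStepA (PySem.Set.ofList valid)) (PySem.Set.empty, []) raw).2
      (fun k => (List.foldl pvStepD PySem.Dict.empty (PySem.List.enumerate valid)).getD k 1000000) false
    = (List.foldl (pvStepB (List.foldl (pvStepP (PySem.Set.ofList valid)) PySem.Set.empty raw)) (PySem.Set.empty, []) valid).2
  set vs := PySem.Set.ofList valid with hvs
  set present := raw.foldl (pvStepP vs) PySem.Set.empty with hpresent
  set ordered := (raw.foldl (pvStepA vs) (PySem.Set.empty, [])).2 with hordered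
  set key : String → Int := fun k => ((PySem.List.enumerate valid).foldl pvStepD PySem.Dict.empty).getD k 1000000 with hkey
  obtain ⟨h1, hnodup_ord, hmem_ord⟩ := pvLoopA_spec vs raw PySem.Set.empty [] (by simp [PySem.Set.empty]) List.nodup_nil
  have hB : (valid.foldl (pvStepB present) (PySem.Set.empty, [])).2
      = valid.filter (fun v => PySem.Set.contains present v) := by
    rw [pvLoopB_spec present valid PySem.Set.empty [] (by simp [PySem.Set.empty]) hnd]
    simp
  rw [hB]
  have hmemf : ∀ y, y ∈ valid.filter (fun v => PySem.Set.contains present v) ↔ y ∈ ordered := by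
    intro y
    rw [List.mem_filter, hmem_ord y]
    simp only [List.not_mem_nil, false_or]
    constructor
    · rintro ⟨hyv, hc⟩
      exact ((pvLoopP_spec vs raw PySem.Set.empty y).mp ((PySem.Set.contains_iff _ _).mp hc)).resolve_left (by simp [PySem.Set.empty])
    · rintro ⟨x, hx, hcx⟩
      refine ⟨pvCanon_mem hcx, (PySem.Set.contains_iff _ _).mpr ?_⟩
      exact (pvLoopP_spec vs raw PySem.Set.empty y).mpr (Or.inr ⟨x, hx, hcx⟩)
  have hperm : (valid.filter (fun v => PySem.Set.contains present v)).Perm ordered :=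
    (List.perm_ext_iff_of_nodup (hnd.filter _) hnodup_ord).mpr hmemf
  have hpw_valid : valid.Pairwise (fun a b => key a < key b) := by
    rw [List.pairwise_iff_getElem]
    intro i j hi hj hij
    rw [hkey]
    simp only
    rw [pvDict_getD_getElem valid 0 PySem.Dict.empty hnd i hi,
        pvDict_getD_getElem valid 0 PySem.Dict.empty hnd j hj]
    omega
  have hpw : (valid.filter (fun v => PySem.Set.contains present v)).Pairwise (fun a b => key a < key b) :=
    hpw_valid.sublist List.filter_sublist
  apply PySem.List.sorted_eq_of_perm_of_pairwise_lt <;> try assumption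

-- ===== VERDICT (by name: the statement is the Claim_ definition above) =====
theorem normalize_option_ids_py_spec : Claim_equal_normalize_option_ids_py := by
  intro raw_ids valid_ids _ hnd
  unfold Spec_normalize_option_ids_py
  exact pvMain raw_ids valid_ids hnd
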